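-- pv_equiv track=rewrite | github.com/Johannes-Zi/CLCR | outputP.py | check_if_frameshift_is_low_cov
-- ===== SOURCE A (Python) =====
-- def check_if_frameshift_is_low_cov(max_detect_dist, low_cov_regions, current_scaffold, framesh_pos_in_scaff):
--     """
--     This functions checks for each frameshift, that was considered by the overlapping heuristic, if the frameshift
--     positions really lays in an original detected low coverage region. Which means before merging low coverage regions
--     that are close together and the step where low cov regions were expanded to work as queries for Diamond.
--     Because only detected frameshifts in low coverage regions are more likely a result of an assembly error. Detected
--     frameshifts in normal coverage regions are more likely the result of the detection of a normal inactivating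
--     mutation.
--     To prevent a hard cutoff between regions where frameshifts are considered and regions where frameshift are excluded,
--     the max_detect_dist is introduced, which means when this variable is for example 10... Framshifts that are 10 Bp
--     next to a low cov region, are still considered in the healing process.
--
--     :param max_detect_dist:
--     :param low_cov_regions:
--     :param current_scaffold:
--     :param framesh_pos_in_scaff:
--     :return:
--     """
--
--     # Turns True if the detected frameshifts is in a original low cov region
--     low_cov_frameshift = False
--
--     # First search matching scaffold
--     for scaffold_data in low_cov_regions:
--
--         # Case that matching scaffold was found
--         if scaffold_data[0] == current_scaffold:
--
--             for low_cov_region in scaffold_data[1]: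
--
--                 considered_start_pos = low_cov_region[0] - max_detect_dist
--                 considered_end_pos = low_cov_region[1] + max_detect_dist
--
--                 # Case for finding a low cov region that overlaps the current frameshift position
--                 if (considered_start_pos <= framesh_pos_in_scaff) and (considered_end_pos >= framesh_pos_in_scaff):
--                     low_cov_frameshift = True
--                     break
--
--                 # Case where all possible low cov regions are passed, and no overlapping could be found
--                 elif considered_start_pos > framesh_pos_in_scaff:
--                     break
--
--             break
--
--     return low_cov_frameshift
-- ===== SOURCE B (Python) =====
-- def check_if_frameshift_is_low_cov(max_detect_dist, low_cov_regions, current_scaffold, framesh_pos_in_scaff):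
--     # First matching scaffold's region list (empty if none matches)
--     regions = next((regs for name, regs in low_cov_regions if name == current_scaffold), [])
--
--     def hit(rs):
--         if not rs:
--             return False
--         start, end = rs[0]
--         if start - max_detect_dist > framesh_pos_in_scaff:
--             return False
--         return end + max_detect_dist >= framesh_pos_in_scaff or hit(rs[1:])
--
--     return hit(regions)
-- ===== Notes on version B (the rewrite author's own statement) =====
-- stated objective: simpler
-- what changed: Replaced A's flag-and-break double loop by a next() scaffold lookup followed by a short-circuit recursion over the regions (stop test first, then overlap-or-recurse).
import Mathlib
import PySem

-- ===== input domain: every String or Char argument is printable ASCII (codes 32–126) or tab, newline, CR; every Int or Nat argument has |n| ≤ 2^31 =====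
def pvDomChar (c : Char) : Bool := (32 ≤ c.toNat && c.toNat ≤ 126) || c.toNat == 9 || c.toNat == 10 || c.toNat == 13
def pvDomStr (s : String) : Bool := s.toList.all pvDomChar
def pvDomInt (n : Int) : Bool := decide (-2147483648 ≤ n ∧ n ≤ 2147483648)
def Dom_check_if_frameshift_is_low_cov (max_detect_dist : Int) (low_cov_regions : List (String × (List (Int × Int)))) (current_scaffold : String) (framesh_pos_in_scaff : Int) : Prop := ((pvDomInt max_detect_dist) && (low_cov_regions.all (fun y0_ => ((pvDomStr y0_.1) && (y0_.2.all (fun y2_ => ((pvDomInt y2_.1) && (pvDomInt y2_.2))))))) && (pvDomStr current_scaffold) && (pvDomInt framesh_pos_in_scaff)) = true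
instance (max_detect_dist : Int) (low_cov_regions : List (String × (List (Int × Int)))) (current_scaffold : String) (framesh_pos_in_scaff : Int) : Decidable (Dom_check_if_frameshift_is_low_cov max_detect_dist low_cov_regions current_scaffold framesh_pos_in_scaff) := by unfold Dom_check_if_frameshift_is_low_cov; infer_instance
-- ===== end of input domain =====

-- B replaces A's flag-and-break double loop by a first-match scaffold lookup followed by a
-- short-circuit recursion over the regions; objective: simpler (no speed claim).


-- ===== PORT A =====
-- inner for-loop over the regions: sets the flag and breaks / breaks without the flag
def aRegionLoop (max_detect_dist framesh_pos_in_scaff : Int) : List (Int × Int) → Bool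
  | [] => false
  | (lo, hi) :: rest =>
    let considered_start_pos := lo - max_detect_dist
    let considered_end_pos := hi + max_detect_dist
    if considered_start_pos ≤ framesh_pos_in_scaff ∧ considered_end_pos ≥ framesh_pos_in_scaff then
      true
    else if considered_start_pos > framesh_pos_in_scaff then
      false
    else
      aRegionLoop max_detect_dist framesh_pos_in_scaff rest

-- outer for-loop: first matching scaffold, then break
def aScaffoldLoop (max_detect_dist : Int) (current_scaffold : String) (framesh_pos_in_scaff : Int) : List (String × (List (Int × Int))) → Bool
  | [] => false
  | (name, regions) :: rest =>
    if name == current_scaffold then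
      aRegionLoop max_detect_dist framesh_pos_in_scaff regions
    else
      aScaffoldLoop max_detect_dist current_scaffold framesh_pos_in_scaff rest

def check_if_frameshift_is_low_cov (max_detect_dist : Int) (low_cov_regions : List (String × (List (Int × Int)))) (current_scaffold : String) (framesh_pos_in_scaff : Int) : Bool :=
  aScaffoldLoop max_detect_dist current_scaffold framesh_pos_in_scaff low_cov_regions

-- ===== PORT B =====
-- recursive region test: stop condition first, then overlap-or-recurse
def bHit (max_detect_dist framesh_pos_in_scaff : Int) : List (Int × Int) → Bool
  | [] => false
  | (start, stop) :: rest =>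
    if start - max_detect_dist > framesh_pos_in_scaff then
      false
    else
      decide (stop + max_detect_dist ≥ framesh_pos_in_scaff) || bHit max_detect_dist framesh_pos_in_scaff rest

def check_if_frameshift_is_low_cov_alt (max_detect_dist : Int) (low_cov_regions : List (String × (List (Int × Int)))) (current_scaffold : String) (framesh_pos_in_scaff : Int) : Bool :=
  let regions := ((low_cov_regions.find? (fun p => p.1 == current_scaffold)).map Prod.snd).getD []
  bHit max_detect_dist framesh_pos_in_scaff regions

-- ===== PRECONDITION & SPEC =====
def Spec_check_if_frameshift_is_low_cov (max_detect_dist : Int) (low_cov_regions : List (String × (List (Int × Int)))) (current_scaffold : String) (framesh_pos_in_scaff : Int) (out : Bool) : Prop := out = check_if_frameshift_is_low_cov_alt max_detect_dist low_cov_regions current_scaffold framesh_pos_in_scaff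
instance (max_detect_dist : Int) (low_cov_regions : List (String × (List (Int × Int)))) (current_scaffold : String) (framesh_pos_in_scaff : Int) (out : Bool) : Decidable (Spec_check_if_frameshift_is_low_cov max_detect_dist low_cov_regions current_scaffold framesh_pos_in_scaff out) := by unfold Spec_check_if_frameshift_is_low_cov; infer_instance

-- ===== CLAIM (what is proved, stated in full; the proofs are below) =====
def Claim_equal_check_if_frameshift_is_low_cov : Prop := ∀ (max_detect_dist : Int) (low_cov_regions : List (String × (List (Int × Int)))) (current_scaffold : String) (framesh_pos_in_scaff : Int), Dom_check_if_frameshift_is_low_cov max_detect_dist low_cov_regions current_scaffold framesh_pos_in_scaff → Spec_check_if_frameshift_is_low_cov max_detect_dist low_cov_regions current_scaffold framesh_pos_in_scaff (check_if_frameshift_is_low_cov max_detect_dist low_cov_regions current_scaffold framesh_pos_in_scaff)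

-- ===== LEMMAS AND PROOFS =====
lemma regionLoop_eq_hit (m p : Int) (rs : List (Int × Int)) :
    aRegionLoop m p rs = bHit m p rs := by
  induction rs with
  | nil => rfl
  | cons r rest ih =>
    obtain ⟨lo, hi⟩ := r
    simp only [aRegionLoop, bHit]
    by_cases hgt : lo - m > p
    · simp only [if_pos hgt]
      rw [if_neg (by omega)]
    · by_cases hov : hi + m ≥ p
      · rw [if_pos (by omega), if_neg hgt]
        simp [hov]
      · rw [if_neg (by omega), if_neg (by omega), if_neg hgt]
        simp [hov, ih]

lemma scaffoldLoop_eq_alt (m : Int) (s : String) (p : Int) (l : List (String × (List (Int × Int)))) :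
    aScaffoldLoop m s p l = bHit m p (((l.find? (fun q => q.1 == s)).map Prod.snd).getD []) := by
  induction l with
  | nil => rfl
  | cons x rest ih =>
    obtain ⟨name, regions⟩ := x
    by_cases h : name == s
    · simp [aScaffoldLoop, List.find?, h, regionLoop_eq_hit]
    · simp [aScaffoldLoop, List.find?, h, ih]

-- ===== VERDICT (by name: the statement is the Claim_ definition above) =====
theorem check_if_frameshift_is_low_cov_spec : Claim_equal_check_if_frameshift_is_low_cov := by
  intro m l s p _
  unfold Spec_check_if_frameshift_is_low_cov check_if_frameshift_is_low_cov check_if_frameshift_is_low_cov_alt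
  exact scaffoldLoop_eq_alt m s p l
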